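-- pv_equiv track=rewrite | github.com/BoomboxAstronaut/Embeddings | src/sandbox/subword_processing.py | word_check
-- ===== SOURCE A (Python) =====
-- def sub_swap(entry, indices: list[int], rep: str):
--     outp = entry.split()
--     for i, idx in enumerate(indices):
--         outp.insert(idx + i, rep)
--     for i, idx in enumerate(indices):
--         outp.pop(idx + 1 - i)
--         outp.pop(idx + 1 - i)
--     return (entry, ' '.join(outp))
--
-- def word_check(cpack):
--     csub, cword, rep = cpack[0], cpack[1], cpack[2]
--     if csub not in cword:
--         return
--     if f'{csub} ' != cword[:len(csub) + 1] and f' {csub}' != cword[len(cword) - len(csub) - 1:] and f' {csub} ' not in cword: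
--         return
--     cword = cword.split()
--     csub = csub.split()
--     is_match = False
--     idx = []
--     for i, y in enumerate(cword[:-1]):
--         if is_match:
--             is_match = False
--             continue
--         if csub[0] == y and csub[1] == cword[i+1]:
--             idx.append(i)
--             is_match = True
--     return sub_swap(' '.join(cword), idx, rep)
-- ===== SOURCE B (Python) =====
-- def word_check(cpack):
--     csub, cword, rep = cpack[0], cpack[1], cpack[2]
--     if csub not in cword:
--         return None
--     if (csub + ' ' != cword[:len(csub) + 1]
--             and ' ' + csub != cword[len(cword) - len(csub) - 1:]
--             and ' ' + csub + ' ' not in cword):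
--         return None
--     words = cword.split()
--     pair = csub.split()
--     out = []
--     i = 0
--     n = len(words)
--     while i < n:
--         if i + 1 < n and words[i] == pair[0] and words[i + 1] == pair[1]:
--             out.append(rep)
--             i += 2
--         else:
--             out.append(words[i])
--             i += 1
--     return (' '.join(words), ' '.join(out))
-- ===== Notes on version B (the rewrite author's own statement) =====
-- stated objective: alternative
-- what changed: A collects match positions and then edits the word list by repeated list.insert/list.pop at computed shifting indices; B rebuilds the word list in one left-to-right pass, emitting the replacement token and skipping two words at each non-overlapping adjacent pair match.
import Mathlib
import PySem

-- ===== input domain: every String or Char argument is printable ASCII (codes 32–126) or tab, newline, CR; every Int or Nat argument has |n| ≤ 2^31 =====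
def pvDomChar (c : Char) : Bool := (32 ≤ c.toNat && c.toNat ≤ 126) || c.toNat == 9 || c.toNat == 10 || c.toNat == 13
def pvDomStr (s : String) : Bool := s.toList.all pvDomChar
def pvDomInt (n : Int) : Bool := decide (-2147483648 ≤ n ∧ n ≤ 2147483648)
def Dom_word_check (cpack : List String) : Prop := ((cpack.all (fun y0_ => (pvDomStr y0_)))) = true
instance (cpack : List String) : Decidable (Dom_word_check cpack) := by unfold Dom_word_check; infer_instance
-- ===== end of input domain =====

-- B replaces A's two-phase edit (collect match positions, then splice them out with repeated
-- list.insert/list.pop at shifted indices) with a single left-to-right rebuild of the word list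
-- (objective: alternative). Equivalence is about the RETURN value; neither version mutates its
-- argument observably.

-- ===== PORT A =====

-- Python list.pop(i): on an in-range index drops that element; Python raises IndexError on an
-- out-of-range index (PySem.List.pop? = none) — unreachable for the indices word_check builds,
-- the list is kept unchanged there.
def pyPop {α : Type} (o : List α) (i : Int) : List α :=
  ((PySem.List.pop? o i).map (·.2)).getD o

def pySubSwap (entry : List Char) (indices : List Int) (rep : List Char) : String × String :=
  let outp := PySem.Chars.split₀ entry
  let outp := (PySem.List.enumerate indices).foldl
      (fun o p => PySem.List.insert o (p.2 + p.1) rep) outp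
  let outp := (PySem.List.enumerate indices).foldl
      (fun o p => pyPop (pyPop o (p.2 + 1 - p.1)) (p.2 + 1 - p.1)) outp
  (String.ofList entry, String.ofList (PySem.Chars.join [' '] outp))

-- cpack[0],cpack[1],cpack[2] raise IndexError on a short list (excluded by Pre_); csub.split()[0/1]
-- raise IndexError when csub has too few words and the comparison is reached (excluded by Pre_):
-- there we read the words with getD.
def word_check (cpack : List String) : Option (String × String) :=
  match cpack with
  | csubS :: cwordS :: repS :: _ =>
    let csub := csubS.toList
    let cword := cwordS.toList
    let rep := repS.toList
    if PySem.Chars.isIn csub cword = false then none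
    else if (csub ++ [' '] ≠ PySem.Chars.slice cword none (some ((csub.length : Int) + 1)) ∧
             [' '] ++ csub ≠ PySem.Chars.slice cword (some ((cword.length : Int) - (csub.length : Int) - 1)) none ∧
             PySem.Chars.isIn ([' '] ++ csub ++ [' ']) cword = false) then none
    else
      let cw := PySem.Chars.split₀ cword
      let cs := PySem.Chars.split₀ csub
      let res := (PySem.List.enumerate (PySem.List.slice cw none (some (-1)))).foldl
        (fun (st : Bool × List Int) p =>
          if st.1 then (false, st.2)
          else if cs.getD 0 [] = p.2 ∧ cs.getD 1 [] = PySem.List.pyGetD cw (p.1 + 1) [] then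
            (true, st.2 ++ [p.1])
          else (false, st.2))
        (false, ([] : List Int))
      some (pySubSwap (PySem.Chars.join [' '] cw) res.2 rep)
  | _ => none

-- ===== PORT B =====

-- single pass: copy words, replacing each (still unconsumed) adjacent pair (pair0, pair1) by rep
def rebuildPairs (pair0 pair1 rep : List Char) : List (List Char) → List (List Char)
  | [] => []
  | [w] => [w]
  | a :: b :: t =>
    if a = pair0 ∧ b = pair1 then rep :: rebuildPairs pair0 pair1 rep t
    else a :: rebuildPairs pair0 pair1 rep (b :: t)
termination_by l => l.length

def word_check_alt (cpack : List String) : Option (String × String) :=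
  match cpack with
  | [] => none
  | [_] => none
  | [_, _] => none
  | csubS :: cwordS :: repS :: _ =>
    let csub := csubS.toList
    let cword := cwordS.toList
    let rep := repS.toList
    if PySem.Chars.isIn csub cword = false then none
    else if (csub ++ [' '] ≠ PySem.Chars.slice cword none (some ((csub.length : Int) + 1)) ∧
             [' '] ++ csub ≠ PySem.Chars.slice cword (some ((cword.length : Int) - (csub.length : Int) - 1)) none ∧
             PySem.Chars.isIn ([' '] ++ csub ++ [' ']) cword = false) then none
    else
      let ws := PySem.Chars.split₀ cword
      let pr := PySem.Chars.split₀ csub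
      let out := rebuildPairs (pr.getD 0 []) (pr.getD 1 []) rep ws
      some (String.ofList (PySem.Chars.join [' '] ws), String.ofList (PySem.Chars.join [' '] out))

-- ===== PRECONDITION & SPEC =====

-- Pre_ excludes exactly the inputs on which Python A raises IndexError (B raises there too):
-- fewer than three pack entries (cpack[2]), or csub splitting into fewer than two words while the
-- pair comparison csub.split()[0]/[1] is actually reached (substring gate passed and a comparison
-- fires). On every input where Python A returns, Pre_ holds.
def Pre_word_check (cpack : List String) : Prop :=
  3 ≤ cpack.length ∧
  (let csub := ((cpack.getD 0 "")).toList
   let cword := ((cpack.getD 1 "")).toList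
   let cs := PySem.Chars.split₀ csub
   let cw := PySem.Chars.split₀ cword
   2 ≤ cs.length ∨
   PySem.Chars.isIn csub cword = false ∨
   (csub ++ [' '] ≠ PySem.Chars.slice cword none (some ((csub.length : Int) + 1)) ∧
    [' '] ++ csub ≠ PySem.Chars.slice cword (some ((cword.length : Int) - (csub.length : Int) - 1)) none ∧
    PySem.Chars.isIn ([' '] ++ csub ++ [' ']) cword = false) ∨
   (cs = [] ∧ cw.length ≤ 1) ∨
   (cs.length = 1 ∧ ∀ w ∈ cw.dropLast, w ≠ cs.getD 0 []))

instance (cpack : List String) : Decidable (Pre_word_check cpack) := by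
  unfold Pre_word_check; infer_instance

def pvWitness_word_check : List String := ["a b", "x a b y a b", "R"]

def Spec_word_check (cpack : List String) (out : Option (String × String)) : Prop := out = word_check_alt cpack
instance (cpack : List String) (out : Option (String × String)) : Decidable (Spec_word_check cpack out) := by unfold Spec_word_check; infer_instance

-- ===== CLAIM (what is proved, stated in full; the proofs are below) =====
def Claim_equal_word_check : Prop := ∀ (cpack : List String), Dom_word_check cpack → Pre_word_check cpack → Spec_word_check cpack (word_check cpack)

-- ===== LEMMAS AND PROOFS =====

def matchIdx (c0 c1 : List Char) : List (List Char) → Nat → List Int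
  | [], _ => []
  | [_], _ => []
  | a :: b :: t, k =>
    if c0 = a ∧ c1 = b then (k : Int) :: matchIdx c0 c1 t (k + 2)
    else matchIdx c0 c1 (b :: t) (k + 1)
termination_by l _ => l.length

theorem matchIdx_nonneg (c0 c1 : List Char) (t : List (List Char)) (k : Nat) :
    ∀ j ∈ matchIdx c0 c1 t k, (k : Int) ≤ j := by
  fun_induction matchIdx c0 c1 t k with
  | case1 => simp
  | case2 => simp
  | case3 a b t k h ih =>
    intro j hj
    rcases List.mem_cons.mp hj with rfl | hj'
    · omega
    · have := ih j hj'; push_cast at this ⊢; omega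
  | case4 a b t k h ih =>
    intro j hj
    have := ih j hj; push_cast at this ⊢; omega

theorem matchIdx_succ (c0 c1 : List Char) (t : List (List Char)) (k : Nat) :
    matchIdx c0 c1 t (k + 1) = (matchIdx c0 c1 t k).map (· + 1) := by
  fun_induction matchIdx c0 c1 t k with
  | case1 => simp [matchIdx]
  | case2 => simp [matchIdx]
  | case3 a b t k h ih =>
    rw [matchIdx.eq_3, if_pos h]
    have h2 : k + 1 + 2 = k + 2 + 1 := by omega
    rw [h2, ih]
    simp
  | case4 a b t k h ih =>
    rw [matchIdx.eq_3, if_neg h]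
    exact ih

theorem matchIdx_bound (c0 c1 : List Char) (t : List (List Char)) (k : Nat) :
    ∀ m (hm : m < (matchIdx c0 c1 t k).length), (k : Int) + 2 * m ≤ (matchIdx c0 c1 t k)[m] := by
  fun_induction matchIdx c0 c1 t k with
  | case1 => simp
  | case2 => simp
  | case3 a b t k h ih =>
    intro m hm
    match m with
    | 0 => simp
    | m + 1 =>
      simp only [List.getElem_cons_succ]
      have := ih m (by simpa using hm)
      push_cast at this ⊢; omega
  | case4 a b t k h ih =>
    intro m hm
    have := ih m (by simpa using hm)
    push_cast at this ⊢; omega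

theorem pv_insert_cons_pos {α : Type} (x : α) (l : List α) (i : Int) (v : α) (h : 1 ≤ i) :
    PySem.List.insert (x :: l) i v = x :: PySem.List.insert l (i - 1) v := by
  simp only [PySem.List.insert, PySem.List.sliceIndices]
  norm_num
  have h1 : ¬ i < 0 := by omega
  have h3 : ¬ i < 1 := by omega
  simp only [if_neg h1, if_neg h3]
  have hmin : (min i ((l.length : Int) + 1)).toNat = (min (i-1) (l.length : Int)).toNat + 1 := by
    omega
  rw [hmin]
  simp [List.take_succ_cons, List.drop_succ_cons]

theorem pv_pyPop_cons_pos {α : Type} (x : α) (l : List α) (i : Int) (h : 1 ≤ i) :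
    pyPop (x :: l) i = x :: pyPop l (i - 1) := by
  simp only [pyPop, PySem.List.pop?, PySem.List.pyIdx?]
  have h1 : (0:Int) ≤ i := by omega
  have h2 : (0:Int) ≤ i - 1 := by omega
  simp only [if_pos h1, if_pos h2]
  by_cases hlt : i < ((x :: l).length : Int)
  · have hlt' : i - 1 < (l.length : Int) := by simp at hlt ⊢; omega
    simp only [if_pos hlt, if_pos hlt']
    have hi : i.toNat = (i-1).toNat + 1 := by omega
    rw [hi]
    simp only [List.getElem?_cons_succ, List.eraseIdx_cons_succ, Option.bind_some]
    cases hopt : l[(i-1).toNat]? <;> simp [hopt]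
  · have hlt' : ¬ (i - 1 < (l.length : Int)) := by simp at hlt ⊢; omega
    simp only [if_neg hlt, if_neg hlt']
    simp

theorem pv_pyPop_zero_cons (a : List Char) (l : List (List Char)) :
    pyPop (a :: l) 0 = l := by
  simp [pyPop, PySem.List.pop?_zero_cons]

def insFoldW (rep : List Char) (l : List (List Char)) (J : List Int) (s : Int) : List (List Char) :=
  List.foldl (fun o p => PySem.List.insert o (p.2 + p.1) rep) l (PySem.List.enumerate J s)

def popFoldW (l : List (List Char)) (J : List Int) (s : Int) : List (List Char) :=
  List.foldl (fun o p => pyPop (pyPop o (p.2 + 1 - p.1)) (p.2 + 1 - p.1)) l (PySem.List.enumerate J s)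

theorem insFoldW_nil (rep : List Char) (l : List (List Char)) (s : Int) :
    insFoldW rep l [] s = l := rfl

theorem popFoldW_nil (l : List (List Char)) (s : Int) :
    popFoldW l [] s = l := rfl

theorem insFoldW_shift (rep : List Char) (J : List Int) :
    ∀ (l : List (List Char)) (s : Int),
    insFoldW rep l J (s + 1) = insFoldW rep l (J.map (· + 1)) s := by
  induction J with
  | nil => intro l s; rfl
  | cons j J ih =>
    intro l s
    simp only [insFoldW, List.map_cons, PySem.List.enumerate_cons, List.foldl_cons]
    have e : j + (s + 1) = j + 1 + s := by ring
    rw [e]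
    exact ih _ (s + 1)

theorem insFoldW_shift1 (rep : List Char) (J : List Int) (l : List (List Char)) :
    insFoldW rep l J 1 = insFoldW rep l (J.map (· + 1)) 0 := by
  have h := insFoldW_shift rep J l 0
  norm_num at h
  exact h

theorem insFoldW_peel (rep x : List Char) (J : List Int) (hJ : ∀ j ∈ J, 1 ≤ j) :
    ∀ (l : List (List Char)) (s : Int), 0 ≤ s →
    insFoldW rep (x :: l) J s = x :: insFoldW rep l (J.map (· - 1)) s := by
  induction J with
  | nil => intro l s _; rfl
  | cons j J ih =>
    intro l s hs
    simp only [insFoldW, List.map_cons, PySem.List.enumerate_cons, List.foldl_cons]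
    have h1 : 1 ≤ j + s := by have := hJ j (by simp); omega
    rw [pv_insert_cons_pos _ _ _ _ h1]
    have e : j + s - 1 = j - 1 + s := by ring
    rw [e]
    exact ih (by intro j' hj'; exact hJ j' (by simp [hj'])) _ (s + 1) (by omega)

theorem popFoldW_shift (J : List Int) :
    ∀ (l : List (List Char)) (s : Int),
    popFoldW l J (s + 1) = popFoldW l (J.map (· - 1)) s := by
  induction J with
  | nil => intro l s; rfl
  | cons j J ih =>
    intro l s
    simp only [popFoldW, List.map_cons, PySem.List.enumerate_cons, List.foldl_cons]
    have e : j + 1 - (s + 1) = j - 1 + 1 - s := by ring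
    rw [e]
    exact ih _ (s + 1)

theorem popFoldW_shift1 (J : List Int) (l : List (List Char)) :
    popFoldW l J 1 = popFoldW l (J.map (· - 1)) 0 := by
  have h := popFoldW_shift J l 0
  norm_num at h
  exact h

theorem popFoldW_peel (x : List Char) (J : List Int) :
    ∀ (l : List (List Char)) (s : Int), 0 ≤ s →
    (∀ k (hk : k < J.length), s + (k : Int) ≤ J[k]) →
    popFoldW (x :: l) J s = x :: popFoldW l (J.map (· - 1)) s := by
  induction J with
  | nil => intro l s _ _; rfl
  | cons j J ih =>
    intro l s hs hJ
    simp only [popFoldW, List.map_cons, PySem.List.enumerate_cons, List.foldl_cons]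
    have h0 : s ≤ j := by have := hJ 0 (by simp); simpa using this
    have h1 : 1 ≤ j + 1 - s := by omega
    rw [pv_pyPop_cons_pos _ _ _ h1]
    rw [pv_pyPop_cons_pos _ _ _ h1]
    have e : j + 1 - s - 1 = j - 1 + 1 - s := by ring
    rw [e]
    exact ih _ (s + 1) (by omega) (by
      intro k hk
      have := hJ (k + 1) (by simpa using hk)
      rw [List.getElem_cons_succ] at this
      push_cast at this ⊢
      omega)

theorem pv_map_add_add (J : List Int) (a b : Int) :
    (J.map (· + a)).map (· + b) = J.map (· + (a + b)) := by
  rw [List.map_map]; apply List.map_congr_left; intro x _; simp; ring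

theorem pv_map_add_sub_one (J : List Int) (a : Int) :
    (J.map (· + a)).map (· - 1) = J.map (· + (a - 1)) := by
  rw [List.map_map]; apply List.map_congr_left; intro x _; simp; ring

theorem pv_ops_eq_rebuild (c0 c1 rep : List Char) (cw : List (List Char)) :
    popFoldW (insFoldW rep cw (matchIdx c0 c1 cw 0) 0) (matchIdx c0 c1 cw 0) 0
      = rebuildPairs c0 c1 rep cw := by
  fun_induction rebuildPairs c0 c1 rep cw with
  | case1 => simp [matchIdx, insFoldW_nil, popFoldW_nil, rebuildPairs]
  | case2 w => simp [matchIdx, insFoldW_nil, popFoldW_nil, rebuildPairs]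
  | case3 a b t h ih =>
    have hM : matchIdx c0 c1 (a :: b :: t) 0 = (0 : Int) :: (matchIdx c0 c1 t 0).map (· + 2) := by
      rw [matchIdx.eq_3, if_pos ⟨h.1.symm, h.2.symm⟩]
      norm_num
      rw [show (2:Nat) = 1 + 1 from rfl, matchIdx_succ, show (1:Nat) = 0 + 1 from rfl,
        matchIdx_succ, pv_map_add_add]
      norm_num
    set J := matchIdx c0 c1 t 0 with hJdef
    have hJ0 : ∀ j ∈ J, (0:Int) ≤ j := by
      intro j hj; simpa using matchIdx_nonneg c0 c1 t 0 j hj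
    have hge1 : ∀ (c : Int), 0 < c → ∀ j ∈ J.map (· + c), 1 ≤ j := by
      intro c hc j hj
      simp only [List.mem_map] at hj
      obtain ⟨x, hx, rfl⟩ := hj
      have := hJ0 x hx; omega
    have hJb : ∀ m (hm : m < J.length), (2 * m : Int) ≤ J[m] := by
      intro m hm; simpa using matchIdx_bound c0 c1 t 0 m hm
    rw [hM]
    have hins : insFoldW rep (a :: b :: t) ((0:Int) :: J.map (· + 2)) 0
        = rep :: a :: b :: insFoldW rep t J 0 := by
      simp only [insFoldW, PySem.List.enumerate_cons, List.foldl_cons]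
      norm_num [PySem.List.insert_zero]
      rw [show List.foldl (fun o p => PySem.List.insert o (p.2 + p.1) rep)
          (rep :: a :: b :: t) (PySem.List.enumerate (J.map (· + 2)) 1)
          = insFoldW rep (rep :: a :: b :: t) (J.map (· + 2)) 1 from rfl]
      rw [insFoldW_shift1, pv_map_add_add]
      norm_num
      rw [insFoldW_peel rep _ _ (hge1 3 (by norm_num)) _ 0 le_rfl]
      rw [pv_map_add_sub_one]
      norm_num
      rw [insFoldW_peel rep _ _ (hge1 2 (by norm_num)) _ 0 le_rfl]
      rw [pv_map_add_sub_one]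
      norm_num
      rw [insFoldW_peel rep _ _ (hge1 1 (by norm_num)) _ 0 le_rfl]
      rw [pv_map_add_sub_one]
      norm_num
      rfl
    rw [hins]
    have hpop : popFoldW (rep :: a :: b :: insFoldW rep t J 0) ((0:Int) :: J.map (· + 2)) 0
        = rep :: popFoldW (insFoldW rep t J 0) J 0 := by
      simp only [popFoldW, PySem.List.enumerate_cons, List.foldl_cons]
      norm_num
      rw [pv_pyPop_cons_pos _ _ _ (by norm_num : (1:Int) ≤ 1)]
      norm_num [pv_pyPop_zero_cons]
      rw [pv_pyPop_cons_pos _ _ _ (by norm_num : (1:Int) ≤ 1)]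
      norm_num [pv_pyPop_zero_cons]
      rw [show List.foldl (fun o p => pyPop (pyPop o (p.2 + 1 - p.1)) (p.2 + 1 - p.1))
          (rep :: insFoldW rep t J 0) (PySem.List.enumerate (J.map (· + 2)) 1)
          = popFoldW (rep :: insFoldW rep t J 0) (J.map (· + 2)) 1 from rfl]
      rw [popFoldW_shift1, pv_map_add_sub_one]
      norm_num
      have hcond : ∀ k (hk : k < (J.map (· + 1)).length), (0:Int) + k ≤ (J.map (· + 1))[k] := by
        intro k hk
        simp only [List.getElem_map]
        have := hJb k (by simpa using hk)
        omega
      rw [popFoldW_peel _ _ _ 0 le_rfl hcond]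
      rw [pv_map_add_sub_one]
      norm_num
      rfl
    rw [hpop, ih]
  | case4 a b t h ih =>
    have hM : matchIdx c0 c1 (a :: b :: t) 0 = (matchIdx c0 c1 (b :: t) 0).map (· + 1) := by
      rw [matchIdx.eq_3, if_neg (fun hc => h ⟨hc.1.symm, hc.2.symm⟩)]
      rw [show (1:Nat) = 0 + 1 from rfl, matchIdx_succ]
    set J := matchIdx c0 c1 (b :: t) 0 with hJdef
    have hJ0 : ∀ j ∈ J, (0:Int) ≤ j := by
      intro j hj; simpa using matchIdx_nonneg c0 c1 (b :: t) 0 j hj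
    have hge1 : ∀ j ∈ J.map (· + 1), (1:Int) ≤ j := by
      intro j hj
      simp only [List.mem_map] at hj
      obtain ⟨x, hx, rfl⟩ := hj
      have := hJ0 x hx; omega
    have hJb : ∀ m (hm : m < J.length), (2 * m : Int) ≤ J[m] := by
      intro m hm; simpa using matchIdx_bound c0 c1 (b :: t) 0 m hm
    rw [hM]
    rw [insFoldW_peel rep _ _ hge1 _ 0 le_rfl]
    rw [pv_map_add_sub_one]
    norm_num
    have hcond : ∀ k (hk : k < (J.map (· + 1)).length), (0:Int) + k ≤ (J.map (· + 1))[k] := by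
      intro k hk
      simp only [List.getElem_map]
      have := hJb k (by simpa using hk)
      omega
    rw [popFoldW_peel _ _ _ 0 le_rfl hcond]
    rw [pv_map_add_sub_one]
    norm_num
    rw [ih]

theorem pv_foldA (c0 c1 : List Char) (cw : List (List Char)) (t : List (List Char)) (s : Nat) :
    ∀ (acc : List Int),
    (∀ j : Nat, j < t.length → PySem.List.pyGetD cw ((s : Int) + (j : Int)) [] = t.getD j []) →
    (List.foldl
      (fun (st : Bool × List Int) p =>
        if st.1 then (false, st.2)
        else if c0 = p.2 ∧ c1 = PySem.List.pyGetD cw (p.1 + 1) [] then (true, st.2 ++ [p.1])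
        else (false, st.2))
      (false, acc) (PySem.List.enumerate t.dropLast (s : Int))).2
      = acc ++ matchIdx c0 c1 t s := by
  induction t, s using matchIdx.induct c0 c1 with
  | case1 s => intro acc _; simp [matchIdx.eq_1]
  | case2 w s => intro acc _; simp [matchIdx.eq_2]
  | case3 a b t s h ih =>
    intro acc hget
    have hb : PySem.List.pyGetD cw ((s : Int) + 1) [] = b := by
      have := hget 1 (by simp)
      simpa using this
    rw [List.dropLast_cons₂, PySem.List.enumerate_cons, List.foldl_cons]
    simp only [Bool.false_eq_true, if_false, hb, if_pos h]
    rw [matchIdx.eq_3, if_pos h]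
    match t with
    | [] => simp [matchIdx.eq_1]
    | t0 :: t' =>
      rw [show (b :: t0 :: t').dropLast = b :: (t0 :: t').dropLast from List.dropLast_cons₂,
        PySem.List.enumerate_cons, List.foldl_cons]
      simp only [if_pos trivial]
      have hget' : ∀ j : Nat, j < (t0 :: t').length →
          PySem.List.pyGetD cw (((s + 2 : Nat) : Int) + (j : Int)) [] = (t0 :: t').getD j [] := by
        intro j hj
        have e : (((s + 2 : Nat) : Int) + (j : Int)) = (s : Int) + ((j + 2 : Nat) : Int) := by
          push_cast; ring
        rw [e, hget (j + 2) (by simpa using hj)]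
        simp
      have := ih (acc ++ [(s : Int)]) hget'
      rw [show (s : Int) + 1 + 1 = ((s + 2 : Nat) : Int) from by push_cast; ring]
      rw [this]
      simp
  | case4 a b t s h ih =>
    intro acc hget
    have hb : PySem.List.pyGetD cw ((s : Int) + 1) [] = b := by
      have := hget 1 (by simp)
      simpa using this
    rw [List.dropLast_cons₂, PySem.List.enumerate_cons, List.foldl_cons]
    simp only [Bool.false_eq_true, if_false, hb, if_neg h]
    rw [matchIdx.eq_3, if_neg h]
    have hget' : ∀ j : Nat, j < (b :: t).length →
        PySem.List.pyGetD cw (((s + 1 : Nat) : Int) + (j : Int)) [] = (b :: t).getD j [] := by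
      intro j hj
      have e : (((s + 1 : Nat) : Int) + (j : Int)) = (s : Int) + ((j + 1 : Nat) : Int) := by
        push_cast; ring
      rw [e, hget (j + 1) (by simpa using hj)]
      simp
    have := ih acc hget'
    rw [show (s : Int) + 1 = ((s + 1 : Nat) : Int) from by push_cast; ring]
    exact this

theorem pv_go_clean : ∀ (s cur : List Char) (acc : List (List Char)),
    (∀ c ∈ cur, PySem.Chars.isspace c = false) →
    (∀ w ∈ acc, w ≠ [] ∧ ∀ c ∈ w, PySem.Chars.isspace c = false) →
    ∀ w ∈ PySem.Chars.split₀.go s cur acc, w ≠ [] ∧ ∀ c ∈ w, PySem.Chars.isspace c = false := by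
  intro s
  induction s with
  | nil =>
    intro cur acc hcur hacc w hw
    rw [PySem.Chars.split₀.go] at hw
    by_cases hemp : cur.isEmpty
    · rw [if_pos hemp] at hw
      exact hacc w (List.mem_reverse.mp hw)
    · rw [if_neg hemp] at hw
      rcases List.mem_cons.mp (List.mem_reverse.mp hw) with rfl | h
      · constructor
        · simpa using fun h => hemp (by simp [h, List.isEmpty_iff])
        · intro ch hch; exact hcur ch (List.mem_reverse.mp hch)
      · exact hacc w h
  | cons c rest ih =>
    intro cur acc hcur hacc w hw
    rw [PySem.Chars.split₀.go] at hw
    by_cases hsp : PySem.Chars.isspace c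
    · rw [if_pos hsp] at hw
      by_cases hemp : cur.isEmpty
      · rw [if_pos hemp] at hw
        exact ih [] acc (by simp) hacc w hw
      · rw [if_neg hemp] at hw
        refine ih [] (cur.reverse :: acc) (by simp) ?_ w hw
        intro w' hw'
        rcases List.mem_cons.mp hw' with rfl | hmem
        · constructor
          · simpa using fun h => hemp (by simp [h, List.isEmpty_iff])
          · intro ch hch; exact hcur ch (List.mem_reverse.mp hch)
        · exact hacc w' hmem
    · rw [if_neg hsp] at hw
      refine ih (c :: cur) acc ?_ hacc w hw
      intro ch hch
      rcases List.mem_cons.mp hch with rfl | hmem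
      · simpa using hsp
      · exact hcur ch hmem

theorem pv_split₀_clean (s : List Char) :
    ∀ w ∈ PySem.Chars.split₀ s, w ≠ [] ∧ ∀ c ∈ w, PySem.Chars.isspace c = false :=
  pv_go_clean s [] [] (by simp) (by simp)

theorem pv_go_word (w : List Char) (hw : ∀ c ∈ w, PySem.Chars.isspace c = false) :
    ∀ (rest cur : List Char) (acc : List (List Char)),
    PySem.Chars.split₀.go (w ++ rest) cur acc
      = PySem.Chars.split₀.go rest (w.reverse ++ cur) acc := by
  induction w with
  | nil => intro rest cur acc; simp
  | cons c w' ih =>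
    intro rest cur acc
    rw [List.cons_append, PySem.Chars.split₀.go,
      if_neg (by simpa using hw c (by simp) : ¬ PySem.Chars.isspace c = true)]
    rw [ih (fun ch hch => hw ch (by simp [hch])) rest (c :: cur) acc]
    simp

theorem pv_join_go (ws : List (List Char)) :
    ∀ acc, (∀ w ∈ ws, w ≠ [] ∧ ∀ c ∈ w, PySem.Chars.isspace c = false) →
    PySem.Chars.split₀.go (PySem.Chars.join [' '] ws) [] acc = acc.reverse ++ ws := by
  induction ws with
  | nil => intro acc _; rw [PySem.Chars.join_nil, PySem.Chars.split₀.go]; simp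
  | cons w ws ih =>
    intro acc hcl
    have hw := hcl w (by simp)
    match ws with
    | [] =>
      rw [PySem.Chars.join_singleton]
      rw [show w = w ++ [] from by simp, pv_go_word w hw.2 [] [] acc]
      rw [PySem.Chars.split₀.go]
      rw [if_neg (by simpa [List.isEmpty_iff] using hw.1)]
      simp
    | v :: ws' =>
      rw [PySem.Chars.join_cons_cons]
      rw [show w ++ [' '] ++ PySem.Chars.join [' '] (v :: ws')
          = w ++ (' ' :: PySem.Chars.join [' '] (v :: ws')) from by simp]
      rw [pv_go_word w hw.2 _ [] acc]
      rw [PySem.Chars.split₀.go, if_pos (by decide : PySem.Chars.isspace ' ' = true)]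
      rw [if_neg (by simpa [List.isEmpty_iff] using hw.1)]
      rw [show w.reverse ++ [] = w.reverse from by simp, List.reverse_reverse]
      rw [ih (w :: acc) (fun x hx => hcl x (by simp [hx]))]
      simp

theorem pv_split_join (ws : List (List Char))
    (h : ∀ w ∈ ws, w ≠ [] ∧ ∀ c ∈ w, PySem.Chars.isspace c = false) :
    PySem.Chars.split₀ (PySem.Chars.join [' '] ws) = ws := by
  rw [PySem.Chars.split₀, pv_join_go ws [] h]
  simp


-- ===== VERDICT (by name: the statement is the Claim_ definition above) =====
theorem word_check_spec : Claim_equal_word_check := by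
  intro cpack _hdom _hpre
  unfold Spec_word_check
  match cpack with
  | [] => rfl
  | [_] => rfl
  | [_, _] => rfl
  | csubS :: cwordS :: repS :: rest =>
    simp only [word_check, word_check_alt]
    by_cases h1 : PySem.Chars.isIn csubS.toList cwordS.toList = false
    · simp [h1]
    · simp only [if_neg h1]
      by_cases h2 : (csubS.toList ++ [' '] ≠ PySem.Chars.slice cwordS.toList none (some ((csubS.toList.length : Int) + 1)) ∧
             [' '] ++ csubS.toList ≠ PySem.Chars.slice cwordS.toList (some ((cwordS.toList.length : Int) - (csubS.toList.length : Int) - 1)) none ∧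
             PySem.Chars.isIn ([' '] ++ csubS.toList ++ [' ']) cwordS.toList = false)
      · rw [if_pos h2, if_pos h2]
      · simp only [if_neg h2, Option.some_inj]
        set cw := PySem.Chars.split₀ cwordS.toList with hcw
        set cs := PySem.Chars.split₀ csubS.toList with hcs
        set c0 := cs.getD 0 [] with hc0
        set c1 := cs.getD 1 [] with hc1
        have hclean := pv_split₀_clean cwordS.toList
        rw [← hcw] at hclean
        -- the loop of A computes matchIdx
        have hget : ∀ j : Nat, j < cw.length →
            PySem.List.pyGetD cw (((0 : Nat) : Int) + (j : Int)) [] = cw.getD j [] := by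
          intro j hj
          rw [show (((0 : Nat) : Int) + (j : Int)) = ((j : Nat) : Int) from by push_cast; ring]
          rw [PySem.List.pyGetD_of_nonneg cw [] (by positivity)]
          simp
        have hfold := pv_foldA c0 c1 cw cw 0 [] hget
        rw [PySem.List.slice_to_neg_one]
        rw [show ((0 : Nat) : Int) = (0 : Int) from rfl] at hfold
        rw [hfold]
        simp only [List.nil_append]
        -- sub_swap over the match indices is the single-pass rebuild
        simp only [pySubSwap]
        rw [pv_split_join cw hclean]
        rw [show List.foldl (fun o p => PySem.List.insert o (p.2 + p.1) repS.toList) cw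
            (PySem.List.enumerate (matchIdx c0 c1 cw 0))
            = insFoldW repS.toList cw (matchIdx c0 c1 cw 0) 0 from rfl]
        rw [show ∀ X, List.foldl (fun o p => pyPop (pyPop o (p.2 + 1 - p.1)) (p.2 + 1 - p.1)) X
            (PySem.List.enumerate (matchIdx c0 c1 cw 0))
            = popFoldW X (matchIdx c0 c1 cw 0) 0 from fun X => rfl]
        rw [pv_ops_eq_rebuild c0 c1 repS.toList cw]
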